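-- pv_equiv track=rewrite | github.com/erfanzar/Xerxes-Agents | src/python/xerxes/runtime/distribution.py | termux_filter_extras
-- ===== SOURCE A (Python) =====
-- TERMUX_EXTRA_EXCLUDED = frozenset(
--     {
--         "faster_whisper",
--         "sentence_transformers",
--         "playwright",
--         "edge_tts",
--         "ctranslate2",
--         "onnxruntime",
--         "elevenlabs",
--         "sounddevice",
--     }
-- )
--
-- def termux_filter_extras(extras: dict[str, list[str]]) -> dict[str, list[str]]:
--     """Strip dependencies that lack Android wheels from a Termux build.
--
--     Args:
--         extras: Mapping of extra name → dependency list (e.g. as parsed from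
--             ``pyproject.toml``).
--
--     Returns:
--         A copy of ``extras`` with any dependency matching
--         :data:`TERMUX_EXTRA_EXCLUDED` removed. Comparison is case-insensitive
--         and ignores ``-``/``_`` so ``faster-whisper`` matches the
--         ``faster_whisper`` blocklist entry.
--     """
--
--     def _normalize(s: str) -> str:
--         """Lower-case ``s`` and collapse ``-`` into ``_`` for matching."""
--         return s.lower().replace("-", "_")
--
--     out: dict[str, list[str]] = {}
--     for extra_name, deps in extras.items():
--         kept = [d for d in deps if not any(forbidden in _normalize(d) for forbidden in TERMUX_EXTRA_EXCLUDED)]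
--         out[extra_name] = kept
--     return out
-- ===== SOURCE B (Python) =====
-- TERMUX_EXTRA_EXCLUDED = frozenset(
--     {
--         "faster_whisper",
--         "sentence_transformers",
--         "playwright",
--         "edge_tts",
--         "ctranslate2",
--         "onnxruntime",
--         "elevenlabs",
--         "sounddevice",
--     }
-- )
--
--
-- def termux_filter_extras(extras: dict[str, list[str]]) -> dict[str, list[str]]:
--     """Copy of ``extras`` with blocklisted dependencies dropped.
--
--     Instead of running one substring search per blocklist entry, normalize each
--     dependency once and make a single left-to-right scan over its positions,
--     asking at each position whether some blocklisted word starts there.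
--     """
--     words = sorted(TERMUX_EXTRA_EXCLUDED)
--
--     def blocked(dep: str) -> bool:
--         nd = dep.lower().replace("-", "_")
--         return any(nd.startswith(w, i) for i in range(len(nd)) for w in words)
--
--     return {name: [d for d in deps if not blocked(d)] for name, deps in extras.items()}
-- ===== Notes on version B (the rewrite author's own statement) =====
-- stated objective: alternative
-- what changed: Replaces the per-blocklist-entry substring search (any 'forbidden in normalized' over the 8-word set) by normalizing each dependency once and making a single left-to-right scan over its positions, testing at each position whether some blocklisted word starts there; the output dict is built as a comprehension.
import Mathlib
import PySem

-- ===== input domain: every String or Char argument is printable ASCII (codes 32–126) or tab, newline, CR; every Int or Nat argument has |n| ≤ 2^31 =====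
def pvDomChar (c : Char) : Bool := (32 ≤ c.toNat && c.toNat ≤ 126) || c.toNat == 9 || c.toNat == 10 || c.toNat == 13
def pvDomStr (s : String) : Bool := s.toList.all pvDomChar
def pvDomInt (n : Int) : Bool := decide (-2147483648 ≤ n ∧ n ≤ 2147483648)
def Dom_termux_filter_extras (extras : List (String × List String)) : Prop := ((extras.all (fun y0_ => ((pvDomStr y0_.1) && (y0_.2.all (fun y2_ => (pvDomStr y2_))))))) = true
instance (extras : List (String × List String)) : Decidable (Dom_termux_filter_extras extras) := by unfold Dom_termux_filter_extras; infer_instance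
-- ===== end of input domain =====

-- B replaces the per-blocklist-entry substring searches by a single positional scan of the
-- normalized dependency (objective: alternative, same asymptotic cost).

-- the module-level blocklist constant (shared, like TERMUX_EXTRA_EXCLUDED in the Python module)
def pvExcludedList : List String :=
  ["faster_whisper", "sentence_transformers", "playwright", "edge_tts",
   "ctranslate2", "onnxruntime", "elevenlabs", "sounddevice"]

-- ===== PORT A =====
def pvTermuxExcluded : PySem.Set String := PySem.Set.ofList pvExcludedList

def pvNormalizeA (s : String) : String :=
  PySem.Str.replace (PySem.Str.lower s) "-" "_"

-- any(forbidden in _normalize(d) for forbidden in TERMUX_EXTRA_EXCLUDED)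
-- (the set is consumed by any(), whose result is iteration-order independent)
def pvBlockedA (d : String) : Bool :=
  pvTermuxExcluded.any (fun forbidden => PySem.Str.isIn forbidden (pvNormalizeA d))

def termux_filter_extras (extras : List (String × List String)) : List (String × List String) :=
  (extras.foldl
    (fun out p => out.insert p.1 (p.2.filter (fun d => !pvBlockedA d)))
    PySem.Dict.empty).items

-- ===== PORT B =====
def pvWordsB : List String :=
  -- sorted(words): Python string order is code-point lexicographic = order on .toList (PySem: prove/sort on the list side)
  PySem.List.sorted (PySem.Set.ofList pvExcludedList) (fun w => w.toList) false

-- any(nd.startswith(w, i) for i in range(len(nd)) for w in words);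
-- nd.startswith(w, i) with 0 ≤ i < len(nd) is exactly 'w is a prefix of nd[i:]',
-- ported by hand as Chars.startswith (nd.drop i) w.toList (exact there).
def pvBlockedB (dep : String) : Bool :=
  let nd := (PySem.Str.replace (PySem.Str.lower dep) "-" "_").toList
  (List.range nd.length).any (fun i => pvWordsB.any (fun w => PySem.Chars.startswith (nd.drop i) w.toList))

def termux_filter_extras_alt (extras : List (String × List String)) : List (String × List String) :=
  (extras.foldl
    (fun out p => out.insert p.1 (p.2.filter (fun d => !pvBlockedB d)))
    PySem.Dict.empty).items

-- ===== PRECONDITION & SPEC =====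
def Spec_termux_filter_extras (extras : List (String × List String)) (out : List (String × List String)) : Prop := out = termux_filter_extras_alt extras
instance (extras : List (String × List String)) (out : List (String × List String)) : Decidable (Spec_termux_filter_extras extras out) := by unfold Spec_termux_filter_extras; infer_instance

-- ===== CLAIM (what is proved, stated in full; the proofs are below) =====
def Claim_equal_termux_filter_extras : Prop := ∀ (extras : List (String × List String)), Dom_termux_filter_extras extras → Spec_termux_filter_extras extras (termux_filter_extras extras)

-- ===== LEMMAS AND PROOFS =====

theorem pvWordsB_perm : pvWordsB.Perm pvTermuxExcluded := by decide

theorem pvExcluded_ne_nil : ∀ w ∈ pvTermuxExcluded, w.toList ≠ [] := by decide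

-- a nonempty word occurs in nd iff it starts at some position strictly below nd.length
theorem isIn_iff_scan (w nd : List Char) (hw : w ≠ []) :
    PySem.Chars.isIn w nd = true ↔ ∃ i ∈ List.range nd.length, w <+: nd.drop i := by
  rw [← PySem.Chars.exists_prefix_drop_iff_isIn]
  constructor
  · rintro ⟨j, hj⟩
    refine ⟨j, List.mem_range.mpr ?_, hj⟩
    by_contra h
    have : nd.drop j = [] := List.drop_eq_nil_of_le (by omega)
    rw [this] at hj
    exact hw (List.prefix_nil.mp hj)
  · rintro ⟨i, _, hi⟩
    exact ⟨i, hi⟩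

theorem pvBlocked_eq (d : String) : pvBlockedA d = pvBlockedB d := by
  unfold pvBlockedA pvBlockedB pvNormalizeA
  rw [Bool.eq_iff_iff]
  simp only [List.any_eq_true, PySem.Str.isIn_eq, PySem.Chars.startswith_iff]
  constructor
  · rintro ⟨w, hw, hin⟩
    obtain ⟨i, hi, hpre⟩ := (isIn_iff_scan _ _ (pvExcluded_ne_nil w hw)).mp hin
    exact ⟨i, hi, w, pvWordsB_perm.mem_iff.mpr hw, hpre⟩
  · rintro ⟨i, hi, w, hw, hpre⟩
    have hw' := pvWordsB_perm.mem_iff.mp hw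
    exact ⟨w, hw', (isIn_iff_scan _ _ (pvExcluded_ne_nil w hw')).mpr ⟨i, hi, hpre⟩⟩

-- ===== VERDICT (by name: the statement is the Claim_ definition above) =====
theorem termux_filter_extras_spec : Claim_equal_termux_filter_extras := by
  intro extras _
  unfold Spec_termux_filter_extras termux_filter_extras termux_filter_extras_alt
  have h : pvBlockedA = pvBlockedB := funext pvBlocked_eq
  rw [h]
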